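-- pv_equiv track=rewrite | github.com/Simone-Piccolo/Repository-Informatica | Esercizio Quadrati Magici/Quadrati Magici.py | verifica_quadrato_magico
-- ===== SOURCE A (Python) =====
-- def verifica_quadrato_magico(matrice):
--
--     """Verifica se la matrice è un quadrato magico."""
--
--     risultato_righe = []
--
--     contatore = 0
--
--     for riga in matrice:
--
--         for elemento in riga:
--
--             contatore += elemento
--
--         risultato_righe.append(contatore)
--
--         contatore = 0
--
--     for i in range(len(risultato_righe)):
--
--         if risultato_righe[i] != risultato_righe[0]:
--
--             return False
--
--     return True
-- ===== SOURCE B (Python) =====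
-- def verifica_quadrato_magico(matrice):
--     """Single pass: compare each later row sum against the first row's sum."""
--     if not matrice:
--         return True
--     target = sum(matrice[0])
--     for riga in matrice[1:]:
--         if sum(riga) != target:
--             return False
--     return True
-- ===== Notes on version B (the rewrite author's own statement) =====
-- stated objective: simpler
-- what changed: Instead of building a list of all row sums and re-scanning it by index, B fixes the first row's sum as the target and short-circuits in a single pass over the remaining rows (using built-in sum per row).
import Mathlib
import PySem

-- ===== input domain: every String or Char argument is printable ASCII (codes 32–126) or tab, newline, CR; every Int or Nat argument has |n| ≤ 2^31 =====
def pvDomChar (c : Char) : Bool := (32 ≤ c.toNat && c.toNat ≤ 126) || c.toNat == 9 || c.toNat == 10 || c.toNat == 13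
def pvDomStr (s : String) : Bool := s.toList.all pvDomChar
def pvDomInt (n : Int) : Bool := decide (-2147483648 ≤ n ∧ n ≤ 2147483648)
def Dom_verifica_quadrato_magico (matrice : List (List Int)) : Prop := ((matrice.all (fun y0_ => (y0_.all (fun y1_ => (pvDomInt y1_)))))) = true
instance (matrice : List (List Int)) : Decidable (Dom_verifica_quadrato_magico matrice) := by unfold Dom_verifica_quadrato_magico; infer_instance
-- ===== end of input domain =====

-- B replaces A's two passes (build the list of row sums, then re-scan it by index
-- against its first element) with one short-circuiting pass comparing each later
-- row sum to the first row's sum; objective: simpler, same complexity.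

-- ===== PORT A =====
def verifica_quadrato_magico (matrice : List (List Int)) : Bool :=
  -- first loop: accumulate contatore over each riga, append to risultato_righe
  let risultato_righe : List Int :=
    matrice.foldl (fun acc riga => acc ++ [riga.foldl (fun contatore elemento => contatore + elemento) 0]) []
  -- second loop: for i in range(len(...)): if r[i] != r[0]: return False; return True
  (List.range risultato_righe.length).all
    (fun i => risultato_righe.getD i 0 == risultato_righe.getD 0 0)

-- ===== PORT B =====
def vqmAltGo (target : Int) (rows : List (List Int)) : Bool :=
  match rows with
  | [] => true
  | riga :: rest => if riga.sum ≠ target then false else vqmAltGo target rest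

def verifica_quadrato_magico_alt (matrice : List (List Int)) : Bool :=
  match matrice with
  | [] => true
  | riga0 :: rest => vqmAltGo riga0.sum rest

-- ===== PRECONDITION & SPEC =====
def Spec_verifica_quadrato_magico (matrice : List (List Int)) (out : Bool) : Prop := out = verifica_quadrato_magico_alt matrice
instance (matrice : List (List Int)) (out : Bool) : Decidable (Spec_verifica_quadrato_magico matrice out) := by unfold Spec_verifica_quadrato_magico; infer_instance

-- ===== CLAIM (what is proved, stated in full; the proofs are below) =====
def Claim_equal_verifica_quadrato_magico : Prop := ∀ (matrice : List (List Int)), Dom_verifica_quadrato_magico matrice → Spec_verifica_quadrato_magico matrice (verifica_quadrato_magico matrice)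

-- ===== LEMMAS AND PROOFS =====

-- A's first loop builds exactly the map of row sums.
theorem vqm_foldl_append (matrice : List (List Int)) (acc : List Int) :
    matrice.foldl (fun acc riga => acc ++ [riga.foldl (fun c e => c + e) 0]) acc
      = acc ++ matrice.map (fun riga => riga.sum) := by
  induction matrice generalizing acc with
  | nil => simp
  | cons r rest ih =>
      simp [List.foldl, ih, List.sum_eq_foldl]

-- index-scan over the whole list = pointwise all
theorem vqm_range_all (l : List Int) (t : Int) :
    (List.range l.length).all (fun i => l.getD i 0 == t) = l.all (fun x => x == t) := by
  rw [Bool.eq_iff_iff]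
  simp only [List.all_eq_true, List.mem_range]
  constructor
  · intro h x hx
    obtain ⟨i, hi, rfl⟩ := List.mem_iff_getElem.mp hx
    have := h i hi
    rwa [List.getD_eq_getElem l 0 hi] at this
  · intro h i hi
    rw [List.getD_eq_getElem l 0 hi]
    exact h _ (List.getElem_mem hi)

theorem vqm_altGo_all (target : Int) (rows : List (List Int)) :
    vqmAltGo target rows = rows.all (fun riga => riga.sum == target) := by
  induction rows with
  | nil => rfl
  | cons r rest ih =>
      by_cases h : r.sum = target <;> simp [vqmAltGo, h, ih]

-- ===== VERDICT (by name: the statement is the Claim_ definition above) =====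
theorem verifica_quadrato_magico_spec : Claim_equal_verifica_quadrato_magico := by
  intro matrice _
  unfold Spec_verifica_quadrato_magico verifica_quadrato_magico
  rw [vqm_foldl_append]
  cases matrice with
  | nil => rfl
  | cons r0 rest =>
      rw [vqm_range_all]
      simp [verifica_quadrato_magico_alt, vqm_altGo_all, List.all_map, Function.comp_def]
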